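-- pv_equiv track=rewrite | github.com/Alhafat/Python | seminars/seminar_2/lesson/exp_3.py | find_days_above_zero
-- ===== SOURCE A (Python) =====
-- def find_days_above_zero(days):
--     count = 0
--     array = []
--     for temp in days:
--         if temp > 0:
--             count += 1
--             array.append(count)
--         else:
--             count = 0
--     return array
-- ===== SOURCE B (Python) =====
-- def find_days_above_zero(days):
--     result = []
--     n = len(days)
--     i = 0
--     while i < n:
--         if days[i] > 0:
--             j = i
--             while j < n and days[j] > 0:
--                 j += 1
--             result.extend(range(1, j - i + 1))
--             i = j
--         else:
--             i += 1
--     return result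
-- ===== Notes on version B (the rewrite author's own statement) =====
-- stated objective: alternative
-- what changed: Replaces the scalar running-counter single pass with a segment decomposition: scan for each maximal run of positive temperatures and emit range(1, L+1) for its length L in one extend.
import Mathlib
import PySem

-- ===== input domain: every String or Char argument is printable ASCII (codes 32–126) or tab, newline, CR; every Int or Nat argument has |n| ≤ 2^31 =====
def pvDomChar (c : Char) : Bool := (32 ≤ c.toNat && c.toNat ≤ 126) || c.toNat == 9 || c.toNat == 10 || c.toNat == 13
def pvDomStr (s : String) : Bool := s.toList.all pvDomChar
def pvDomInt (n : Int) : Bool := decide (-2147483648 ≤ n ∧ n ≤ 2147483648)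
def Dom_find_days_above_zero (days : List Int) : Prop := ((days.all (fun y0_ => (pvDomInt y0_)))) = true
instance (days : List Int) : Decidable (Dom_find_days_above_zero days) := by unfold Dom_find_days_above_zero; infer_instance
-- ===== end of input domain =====

-- B replaces A's scalar running-counter single pass by a segment decomposition
-- (scan each maximal positive run, emit 1..L for its length L): objective "alternative".


-- ===== PORT A =====
-- literal port of A's for-loop: state (count, array), append count on positive, reset on else
def find_days_above_zero (days : List Int) : List Int :=
  (days.foldl
    (fun (s : Int × List Int) temp =>
      if temp > 0 then (s.1 + 1, s.2 ++ [s.1 + 1]) else ((0 : Int), s.2))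
    ((0 : Int), ([] : List Int))).2

-- ===== PORT B =====
-- inner while: first index j ≥ i with j = n or days[j] ≤ 0
def pvBInner (days : List Int) (j : Nat) : Nat :=
  if h : j < days.length then
    if days[j] > 0 then pvBInner days (j + 1) else j
  else j
termination_by days.length - j

theorem pvBInner_ge (days : List Int) (j : Nat) : j ≤ pvBInner days j := by
  unfold pvBInner
  split
  · split
    · exact le_trans (Nat.le_succ j) (pvBInner_ge days (j + 1))
    · exact le_refl j
  · exact le_refl j
termination_by days.length - j

theorem pvBInner_le (days : List Int) (j : Nat) (hjl : j ≤ days.length) :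
    pvBInner days j ≤ days.length := by
  unfold pvBInner
  split
  · split
    · exact pvBInner_le days (j + 1) (by omega)
    · omega
  · omega
termination_by days.length - j

-- outer while over i, extending result by range(1, j-i+1) per positive run
def pvBOuter (days : List Int) (i : Nat) (result : List Int) : List Int :=
  if h : i < days.length then
    if hp : days[i] > 0 then
      let j := pvBInner days i
      have hj : i < j := by
        have : pvBInner days i = pvBInner days (i + 1) := by
          rw [pvBInner]; simp [h, hp]
        have := pvBInner_ge days (i + 1)
        omega
      pvBOuter days j (result ++ (List.range (j - i)).map (fun k : Nat => (k : Int) + 1))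
    else pvBOuter days (i + 1) result
  else result
termination_by days.length - i
decreasing_by
  all_goals first
    | omega
    | (have h2 := pvBInner_le days i (Nat.le_of_lt h); omega)

def find_days_above_zero_alt (days : List Int) : List Int :=
  pvBOuter days 0 []

-- ===== PRECONDITION & SPEC =====
def Spec_find_days_above_zero (days : List Int) (out : List Int) : Prop := out = find_days_above_zero_alt days
instance (days : List Int) (out : List Int) : Decidable (Spec_find_days_above_zero days out) := by unfold Spec_find_days_above_zero; infer_instance

-- ===== CLAIM (what is proved, stated in full; the proofs are below) =====
def Claim_equal_find_days_above_zero : Prop := ∀ (days : List Int), Dom_find_days_above_zero days → Spec_find_days_above_zero days (find_days_above_zero days)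

-- ===== LEMMAS AND PROOFS =====

-- characterisation of A's loop: g c xs = the outputs of the loop started with count = c
def pvG (c : Int) : List Int → List Int
  | [] => []
  | t :: rest => if t > 0 then (c + 1) :: pvG (c + 1) rest else pvG 0 rest

theorem pvA_foldl (xs : List Int) (c : Int) (acc : List Int) :
    (xs.foldl
      (fun (s : Int × List Int) temp =>
        if temp > 0 then (s.1 + 1, s.2 ++ [s.1 + 1]) else ((0 : Int), s.2))
      (c, acc)).2 = acc ++ pvG c xs := by
  induction xs generalizing c acc with
  | nil => simp [pvG]
  | cons t rest ih =>
    by_cases ht : t > 0 <;> simp [pvG, ht, ih, List.append_assoc]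

theorem pvG_run (xs : List Int) (c : Int) :
    pvG c xs = (List.range (xs.takeWhile (fun t => decide (0 < t))).length).map
        (fun k : Nat => c + (k : Int) + 1) ++ pvG 0 (xs.dropWhile (fun t => decide (0 < t))) := by
  induction xs generalizing c with
  | nil => simp [pvG]
  | cons t rest ih =>
    by_cases ht : (0 : Int) < t
    · rw [pvG, if_pos ht, ih (c + 1), List.takeWhile_cons, List.dropWhile_cons]
      simp only [ht, decide_true, if_pos, List.length_cons, List.range_succ_eq_map,
        List.map_cons, List.map_map, List.cons_append, List.cons.injEq]
      constructor
      · omega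
      · congr 1
        apply List.map_congr_left
        intro k _
        simp only [Function.comp]
        omega
    · simp [pvG, ht, List.takeWhile_cons, List.dropWhile_cons]

theorem pvBInner_spec (days : List Int) (j : Nat) :
    pvBInner days j = j + ((days.drop j).takeWhile (fun t => decide (0 < t))).length := by
  by_cases h : j < days.length
  · have hd : days.drop j = days[j] :: days.drop (j + 1) := List.drop_eq_getElem_cons h
    by_cases hp : days[j] > 0
    · rw [pvBInner]; simp only [h, dif_pos, hp, if_pos]
      rw [pvBInner_spec days (j + 1), hd]
      rw [List.takeWhile_cons]
      simp only [hp, decide_true]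
      simp
      omega
    · rw [pvBInner]; simp only [h, dif_pos, hp, if_neg]
      rw [hd]
      simp
      omega
  · rw [pvBInner]
    simp [h, List.drop_eq_nil_of_le (by omega : days.length ≤ j)]
termination_by days.length - j

theorem pvBOuter_spec (days : List Int) (i : Nat) (acc : List Int) :
    pvBOuter days i acc = acc ++ pvG 0 (days.drop i) := by
  by_cases h : i < days.length
  · have hd : days.drop i = days[i] :: days.drop (i + 1) := List.drop_eq_getElem_cons h
    by_cases hp : days[i] > 0
    · rw [pvBOuter]; simp only [h, dif_pos, hp, dif_pos]
      set L := ((days.drop i).takeWhile (fun t => decide (0 < t))).length with hL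
      have hLpos : 0 < L := by
        rw [hL, hd, List.takeWhile_cons]
        simp only [hp, decide_true]
        simp
      have hj : pvBInner days i = i + L := pvBInner_spec days i
      have hjlt : i < pvBInner days i := by omega
      rw [pvBOuter_spec days (pvBInner days i)]
      rw [hj]
      have hdropj : days.drop (i + L) = (days.drop i).dropWhile (fun t => decide (0 < t)) := by
        rw [← List.drop_drop]
        conv_lhs => rw [show days.drop i
          = (days.drop i).takeWhile (fun t => decide (0 < t))
            ++ (days.drop i).dropWhile (fun t => decide (0 < t)) from
            (List.takeWhile_append_dropWhile).symm]
        rw [List.drop_left' hL.symm]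
      rw [hdropj, pvG_run (days.drop i) 0, ← hL, Nat.add_sub_cancel_left]
      have hmap : (List.range L).map (fun k : Nat => ((k : Int) + 1)) =
          (List.range L).map (fun k : Nat => (0 : Int) + (k : Int) + 1) := by
        apply List.map_congr_left
        intro k _
        omega
      rw [List.append_assoc, hmap]
    · rw [pvBOuter]; simp only [h, dif_pos, hp, dif_neg]
      rw [pvBOuter_spec days (i + 1), hd]
      simp [pvG, hp]
  · rw [pvBOuter]
    simp [h, List.drop_eq_nil_of_le (by omega : days.length ≤ i), pvG]
termination_by days.length - i
decreasing_by
  all_goals first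
    | omega
    | (have hbi := pvBInner_spec days i
       have hd2 : days.drop i = days[i] :: days.drop (i + 1) := List.drop_eq_getElem_cons h
       have hpos : 0 < ((days.drop i).takeWhile (fun t => decide (0 < t))).length := by
         rw [hd2]; simp [hp]
       omega)

-- ===== VERDICT (by name: the statement is the Claim_ definition above) =====
theorem find_days_above_zero_spec : Claim_equal_find_days_above_zero := by
  intro days _
  unfold Spec_find_days_above_zero find_days_above_zero find_days_above_zero_alt
  rw [pvA_foldl, pvBOuter_spec]
  simp
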